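-- pv_equiv track=rewrite | github.com/Jinchili/Leetcode | Hamming_distance.py | del_quo
-- ===== SOURCE A (Python) =====
-- def del_quo(a_string):
--     if a_string ==None:
--         return None
--     d_pair=[]
--     del_list=[]
--     for i in range(len(a_string)):
--         if a_string[i] =="(":
--             d_pair=d_pair+[i]
--         elif a_string[i] ==")":
--             if d_pair !=[]:
--                 del_list=del_list+[d_pair.pop()]+[i]
--     b_list=''
--     for j in range(len(a_string)):
--         if j not in del_list:
--             b_list=b_list+a_string[j]
--     return str(b_list)
-- ===== SOURCE B (Python) =====
-- def del_quo(a_string):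
--     if a_string is None:
--         return None
--     stack = []          # segments before each still-unmatched '('
--     cur = []            # chars after the last unmatched '('
--     for ch in a_string:
--         if ch == '(':
--             stack.append(cur)
--             cur = []
--         elif ch == ')' and stack:
--             prev = stack.pop()      # matched pair: drop both parens,
--             prev.extend(cur)        # keep the inner content
--             cur = prev
--         else:
--             cur.append(ch)
--     out = []
--     for seg in stack:               # reinsert the unmatched '(' boundaries
--         out.extend(seg)
--         out.append('(')
--     out.extend(cur)
--     return ''.join(out)
-- ===== Notes on version B (the rewrite author's own statement) =====
-- stated objective: faster
-- what changed: Replaces A's quadratic index bookkeeping (appending matched indices to del_list, then a second pass rescanning membership in del_list with string concatenation) by a single pass over the characters that keeps a stack of text segments: an opening paren pushes the current segment, a matched closing paren pops and concatenates (dropping the pair), and the still-unmatched opening parens are reinserted as segment boundaries at the end.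
import Mathlib
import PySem

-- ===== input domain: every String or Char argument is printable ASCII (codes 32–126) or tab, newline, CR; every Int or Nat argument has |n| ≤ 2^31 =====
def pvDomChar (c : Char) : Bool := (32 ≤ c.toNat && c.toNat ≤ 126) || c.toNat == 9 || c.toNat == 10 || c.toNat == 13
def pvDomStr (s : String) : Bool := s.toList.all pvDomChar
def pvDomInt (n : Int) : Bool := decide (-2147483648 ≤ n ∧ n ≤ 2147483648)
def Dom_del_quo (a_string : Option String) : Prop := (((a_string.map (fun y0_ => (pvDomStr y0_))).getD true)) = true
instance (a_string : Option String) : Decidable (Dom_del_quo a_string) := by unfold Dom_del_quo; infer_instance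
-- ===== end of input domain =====

-- B replaces A's two quadratic index passes (index lists + 'j not in del_list' rescans +
-- string concatenation) by one pass over the characters with a stack of kept segments.

-- ===== PORT A =====
-- first loop body: d_pair/del_list update at index i
def aStep (cs : List Char) (st : List Nat × List Nat) (i : Nat) : List Nat × List Nat :=
  if cs.getD i ' ' = '(' then (st.1 ++ [i], st.2)
  else if cs.getD i ' ' = ')' then
    if st.1 ≠ [] then (st.1.dropLast, st.2 ++ [st.1.getLastD 0] ++ [i])
    else st
  else st

def del_quo (a_string : Option String) : Option String :=
  match a_string with
  | none => none
  | some s =>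
    let cs := s.toList
    let st := (List.range cs.length).foldl (aStep cs) ([], [])
    let b := (List.range cs.length).foldl
      (fun acc j => if j ∉ st.2 then acc ++ [cs.getD j ' '] else acc) ([] : List Char)
    some (String.ofList b)

-- ===== PORT B =====
-- loop body: segment stack / current segment update on one character
def bStep (st : List (List Char) × List Char) (c : Char) : List (List Char) × List Char :=
  if c = '(' then (st.1 ++ [st.2], [])
  else if c = ')' ∧ st.1 ≠ [] then (st.1.dropLast, st.1.getLastD [] ++ st.2)
  else (st.1, st.2 ++ [c])

def del_quo_alt (a_string : Option String) : Option String :=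
  match a_string with
  | none => none
  | some s =>
    let st := s.toList.foldl bStep ([], [])
    let out := st.1.foldl (fun acc seg => acc ++ seg ++ ['(']) ([] : List Char)
    some (String.ofList (out ++ st.2))

-- ===== PRECONDITION & SPEC =====
def Spec_del_quo (a_string : Option String) (out : Option String) : Prop := out = del_quo_alt a_string
instance (a_string : Option String) (out : Option String) : Decidable (Spec_del_quo a_string out) := by unfold Spec_del_quo; infer_instance

-- ===== CLAIM (what is proved, stated in full; the proofs are below) =====
def Claim_equal_del_quo : Prop := ∀ (a_string : Option String), Dom_del_quo a_string → Spec_del_quo a_string (del_quo a_string)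

-- ===== LEMMAS AND PROOFS =====

-- the characters of cs at indices in [a, b) that are not in del
def kept (cs : List Char) (del : List Nat) (a b : Nat) : List Char :=
  ((List.range' a (b - a)).filter (fun j => decide (j ∉ del))).map (fun j => cs.getD j ' ')

-- the segment list corresponding to the open-paren positions d, lower bound lo
def front (cs : List Char) (del : List Nat) : Nat → List Nat → List (List Char)
  | _, [] => []
  | lo, p :: rest => kept cs del lo p :: front cs del (p + 1) rest

-- lower bound of the current segment
def lastLo : Nat → List Nat → Nat
  | lo, [] => lo
  | _, p :: rest => lastLo (p + 1) rest

lemma kept_self (cs : List Char) (del : List Nat) (a : Nat) : kept cs del a a = [] := by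
  simp [kept]

lemma kept_split (cs : List Char) (del : List Nat) {a b c : Nat} (h1 : a ≤ b) (h2 : b ≤ c) :
    kept cs del a c = kept cs del a b ++ kept cs del b c := by
  unfold kept
  rw [← List.map_append, ← List.filter_append]
  have : List.range' a (b - a) ++ List.range' b (c - b) = List.range' a (c - a) := by
    have h3 := List.range'_append (s := a) (m := b - a) (n := c - b) (step := 1)
    rw [show a + 1 * (b - a) = b by omega, show b - a + (c - b) = c - a by omega] at h3
    exact h3
  rw [this]

lemma kept_one (cs : List Char) (del : List Nat) (a : Nat) :
    kept cs del a (a + 1) = if a ∈ del then [] else [cs.getD a ' '] := by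
  by_cases h : a ∈ del <;> simp [kept, h]

lemma kept_succ (cs : List Char) (del : List Nat) {a b : Nat} (h : a ≤ b) :
    kept cs del a (b + 1) = kept cs del a b ++ (if b ∈ del then [] else [cs.getD b ' ']) := by
  rw [kept_split cs del h (Nat.le_succ b), kept_one]

lemma kept_congr (cs : List Char) {del del' : List Nat} {a b : Nat}
    (h : ∀ j, a ≤ j → j < b → (j ∈ del' ↔ j ∈ del)) :
    kept cs del' a b = kept cs del a b := by
  unfold kept
  congr 1
  apply List.filter_congr
  intro j hj
  have hm := List.mem_range'_1.mp hj
  have hj2 : j < b := by omega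
  simp only [decide_eq_decide]
  exact not_congr (h j hm.1 hj2)

lemma front_append (cs : List Char) (del : List Nat) (d : List Nat) (p : Nat) :
    ∀ lo, front cs del lo (d ++ [p]) = front cs del lo d ++ [kept cs del (lastLo lo d) p] := by
  induction d with
  | nil => intro lo; simp [front, lastLo]
  | cons q rest ih => intro lo; simp [front, lastLo, ih]

lemma lastLo_append (d : List Nat) (p : Nat) : ∀ lo, lastLo lo (d ++ [p]) = p + 1 := by
  induction d with
  | nil => intro lo; simp [lastLo]
  | cons q rest ih => intro lo; simp [lastLo, ih]

lemma lastLo_le (d : List Nat) : ∀ lo i, (∀ p ∈ d, p < i) → lo ≤ i → lastLo lo d ≤ i := by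
  induction d with
  | nil => intro lo i _ h2; simpa [lastLo]
  | cons q rest ih =>
    intro lo i h1 h2
    simp only [lastLo]
    exact ih (q + 1) i (fun p hp => h1 p (List.mem_cons_of_mem _ hp))
      (h1 q (List.mem_cons_self))

lemma front_congr (cs : List Char) {del del' : List Nat} (d : List Nat) (m : Nat)
    (h : ∀ j, j < m → (j ∈ del' ↔ j ∈ del)) (hd : ∀ p ∈ d, p ≤ m) :
    ∀ lo, front cs del' lo d = front cs del lo d := by
  induction d with
  | nil => intro lo; simp [front]
  | cons q rest ih =>
    intro lo
    have hq : q ≤ m := hd q List.mem_cons_self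
    simp only [front]
    rw [kept_congr cs (fun j _ hj => h j (by omega)),
      ih (fun p hp => hd p (List.mem_cons_of_mem _ hp))]

-- final assembly: interleaving the segments with '(' at the d positions restores the filter
lemma assemble (cs : List Char) (del : List Nat) :
    ∀ (d : List Nat) (lo n : Nat) (acc : List Char),
    (∀ p ∈ d, lo ≤ p ∧ p < n) → lo ≤ n →
    (∀ p ∈ d, p ∉ del) → (∀ p ∈ d, cs.getD p ' ' = '(') →
    ((d ++ [n]).Pairwise (· < ·)) →
    (front cs del lo d).foldl (fun a seg => a ++ seg ++ ['(']) acc ++ kept cs del (lastLo lo d) n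
      = acc ++ kept cs del lo n := by
  intro d
  induction d with
  | nil => intro lo n acc _ _ _ _ _; simp [front, lastLo]
  | cons p rest ih =>
    intro lo n acc hb hlon hdel hch hpw
    have hpn : p < n := (hb p List.mem_cons_self).2
    have hlop : lo ≤ p := (hb p List.mem_cons_self).1
    have hrest : ∀ q ∈ rest, p < q := by
      have := (List.pairwise_cons.mp hpw).1
      intro q hq; exact this q (by simp [hq])
    simp only [front, lastLo, List.foldl_cons]
    rw [ih (p + 1) n (acc ++ kept cs del lo p ++ ['('])
      (fun q hq => ⟨hrest q hq, (hb q (List.mem_cons_of_mem _ hq)).2⟩) (by omega)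
      (fun q hq => hdel q (List.mem_cons_of_mem _ hq))
      (fun q hq => hch q (List.mem_cons_of_mem _ hq))
      ((List.pairwise_cons.mp hpw).2)]
    have : kept cs del lo n = kept cs del lo p ++ kept cs del p (p + 1) ++ kept cs del (p + 1) n := by
      rw [← kept_split cs del hlop (Nat.le_succ p), kept_split cs del (by omega : lo ≤ p + 1) (by omega)]
    rw [this, kept_one, if_neg (hdel p List.mem_cons_self), hch p List.mem_cons_self]
    simp

-- A's second loop builds exactly kept
lemma loop2_eq (cs : List Char) (del : List Nat) :
    ∀ (n a : Nat) (acc : List Char),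
    (List.range' a n).foldl
      (fun acc j => if j ∉ del then acc ++ [cs.getD j ' '] else acc) acc
      = acc ++ kept cs del a (a + n) := by
  intro n
  induction n with
  | zero => intro a acc; simp [kept_self]
  | succ m ih =>
    intro a acc
    rw [List.range'_succ, List.foldl_cons, ih]
    have h1 : kept cs del a (a + (m + 1)) = kept cs del a (a + 1) ++ kept cs del (a + 1) (a + 1 + m) := by
      rw [← kept_split cs del (by omega) (by omega)]
      congr 1; omega
    rw [h1, kept_one]
    by_cases h : a ∈ del <;> simp [h]

-- the main simulation invariant between A's first loop and B's loop
lemma main_inv (cs : List Char) :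
    ∀ (cs' : List Char) (i : Nat) (d del : List Nat),
    cs' = cs.drop i → i + cs'.length = cs.length →
    ((d ++ [i]).Pairwise (· < ·)) →
    (∀ j ∈ del, j < i) →
    (∀ p ∈ d, p ∉ del) →
    (∀ p ∈ d, cs.getD p ' ' = '(') →
    (cs'.foldl bStep (front cs del 0 d, kept cs del (lastLo 0 d) i)).1.foldl
        (fun a seg => a ++ seg ++ ['(']) []
      ++ (cs'.foldl bStep (front cs del 0 d, kept cs del (lastLo 0 d) i)).2
    = kept cs ((List.range' i cs'.length).foldl (aStep cs) (d, del)).2 0 cs.length := by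
  intro cs'
  induction cs' with
  | nil =>
    intro i d del hdrop hlen hpw hdel hdd hch
    simp only [List.foldl_nil, List.length_nil, List.range'_zero]
    have hi : i = cs.length := by simpa using hlen
    have hb : ∀ p ∈ d, 0 ≤ p ∧ p < cs.length := by
      intro p hp
      have := List.pairwise_append.mp hpw
      exact ⟨Nat.zero_le _, hi ▸ this.2.2 p hp i (by simp)⟩
    have := assemble cs del d 0 cs.length [] hb (Nat.zero_le _) hdd hch (hi ▸ hpw)
    simpa [hi] using this
  | cons c rest ih =>
    intro i d del hdrop hlen hpw hdel hdd hch
    have h0 : cs[i]? = some c := by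
      have h : (List.drop i cs)[0]? = cs[i + 0]? := List.getElem?_drop
      rw [← hdrop] at h
      simpa using h.symm
    have hc : cs.getD i ' ' = c := by simp [List.getD, h0]
    have hrest : rest = cs.drop (i + 1) := by
      have h : (List.drop i cs).drop 1 = cs.drop (i + 1) := by
        rw [List.drop_drop]
      rw [← hdrop] at h
      simpa using h
    have hlen' : (i + 1) + rest.length = cs.length := by
      simp at hlen; omega
    have hpair := List.pairwise_append.mp hpw
    have hdi : ∀ p ∈ d, p < i := by
      intro p hp; exact hpair.2.2 p hp i (by simp)
    have hinot : i ∉ del := fun hm => absurd (hdel i hm) (by omega)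
    simp only [List.length_cons, List.range'_succ, List.foldl_cons]
    by_cases h1 : c = '('
    · -- push
      subst h1
      have hstep : bStep (front cs del 0 d, kept cs del (lastLo 0 d) i) '(' =
          (front cs del 0 d ++ [kept cs del (lastLo 0 d) i], []) := by
        simp [bStep]
      have hastep : aStep cs (d, del) i = (d ++ [i], del) := by
        unfold aStep; rw [hc]; simp
      have epair : (front cs del 0 d ++ [kept cs del (lastLo 0 d) i], ([] : List Char))
          = (front cs del 0 (d ++ [i]), kept cs del (lastLo 0 (d ++ [i])) (i + 1)) := by
        rw [front_append, lastLo_append, kept_self]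
      rw [hstep, hastep, epair]
      apply ih (i + 1) (d ++ [i]) del hrest hlen'
      · have h3 : ∀ a ∈ d ++ [i], a < i + 1 := by
          intro a ha
          rcases List.mem_append.mp ha with h | h
          · exact Nat.lt_succ_of_lt (hdi a h)
          · simp at h; omega
        rw [List.pairwise_append]
        exact ⟨hpw, by simp, fun a ha b hb => by simp at hb; subst hb; exact h3 a ha⟩
      · exact fun j hj => Nat.lt_succ_of_lt (hdel j hj)
      · intro p hp
        rcases List.mem_append.mp hp with hp | hp
        · exact hdd p hp
        · simp at hp; subst hp; exact hinot
      · intro p hp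
        rcases List.mem_append.mp hp with hp | hp
        · exact hch p hp
        · simp at hp; subst hp; exact hc
    · by_cases h2 : c = ')'
      · subst h2
        rcases List.eq_nil_or_concat d with hd0 | ⟨d0, p, hdp⟩
        · -- unmatched ')': both sides just keep going
          subst hd0
          have hstep : bStep (front cs del 0 ([] : List Nat), kept cs del (lastLo 0 ([] : List Nat)) i) ')' =
              (front cs del 0 ([] : List Nat), kept cs del (lastLo 0 ([] : List Nat)) i ++ [')']) := by
            simp [bStep, front]
          have hastep : aStep cs (([] : List Nat), del) i = (([] : List Nat), del) := by
            unfold aStep; rw [hc]; simp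
          have epair : (front cs del 0 ([] : List Nat), kept cs del (lastLo 0 ([] : List Nat)) i ++ [')'])
              = (front cs del 0 ([] : List Nat), kept cs del (lastLo 0 ([] : List Nat)) (i + 1)) := by
            simp only [lastLo]
            rw [kept_succ cs del (Nat.zero_le i), if_neg hinot, hc]
          rw [hstep, hastep, epair]
          exact ih (i + 1) [] del hrest hlen' (by simp)
            (fun j hj => Nat.lt_succ_of_lt (hdel j hj)) (by simp) (by simp)
        · -- matched pair: pop
          rw [List.concat_eq_append] at hdp
          subst hdp
          have hpi : p < i := hdi p (by simp)
          have hd0i : ∀ q ∈ d0, q < p := by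
            have := List.pairwise_append.mp hpair.1
            intro q hq; exact this.2.2 q hq p (by simp)
          have hpdel : p ∉ del := hdd p (by simp)
          have hpch : cs.getD p ' ' = '(' := hch p (by simp)
          have hfr : front cs del 0 (d0 ++ [p]) =
              front cs del 0 d0 ++ [kept cs del (lastLo 0 d0) p] := front_append cs del d0 p 0
          have hstep : bStep (front cs del 0 (d0 ++ [p]), kept cs del (lastLo 0 (d0 ++ [p])) i) ')' =
              (front cs del 0 d0, kept cs del (lastLo 0 d0) p ++ kept cs del (lastLo 0 (d0 ++ [p])) i) := by
            rw [hfr]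
            simp [bStep]
          have hastep : aStep cs (d0 ++ [p], del) i = (d0, del ++ [p] ++ [i]) := by
            unfold aStep; rw [hc]
            simp
          rw [hstep, hastep]
          set del' := del ++ [p] ++ [i] with hdel'
          have hmemdel' : ∀ j, j ∈ del' ↔ (j ∈ del ∨ j = p ∨ j = i) := by
            intro j; simp [hdel']
          have hL : lastLo 0 d0 ≤ p := lastLo_le d0 0 p hd0i (Nat.zero_le p)
          have hiff : ∀ j, j < p → (j ∈ del' ↔ j ∈ del) := by
            intro j hj
            rw [hmemdel' j]
            constructor
            · rintro (hx | hx | hx)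
              · exact hx
              · omega
              · omega
            · exact Or.inl
          have e1 : front cs del 0 d0 = front cs del' 0 d0 :=
            (front_congr cs d0 p hiff (fun q hq => Nat.le_of_lt (hd0i q hq)) 0).symm
          have e2 : kept cs del (lastLo 0 d0) p ++ kept cs del (lastLo 0 (d0 ++ [p])) i =
              kept cs del' (lastLo 0 d0) (i + 1) := by
            rw [lastLo_append]
            have hs : kept cs del' (lastLo 0 d0) (i + 1) =
                kept cs del' (lastLo 0 d0) p ++ kept cs del' p (p + 1) ++
                kept cs del' (p + 1) i ++ kept cs del' i (i + 1) := by
              rw [kept_split cs del' hL (show p ≤ i + 1 by omega),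
                kept_split cs del' (show p ≤ p + 1 by omega) (show p + 1 ≤ i + 1 by omega),
                kept_split cs del' (show p + 1 ≤ i by omega) (show i ≤ i + 1 by omega)]
              simp [List.append_assoc]
            rw [hs]
            have c1 : kept cs del' (lastLo 0 d0) p = kept cs del (lastLo 0 d0) p := by
              apply kept_congr
              intro j _ hj
              rw [hmemdel']
              constructor
              · rintro (h | h | h)
                · exact h
                · omega
                · omega
              · exact Or.inl
            have c2 : kept cs del' p (p + 1) = [] := by
              rw [kept_one, if_pos ((hmemdel' p).mpr (Or.inr (Or.inl rfl)))]
            have c3 : kept cs del' (p + 1) i = kept cs del (p + 1) i := by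
              apply kept_congr
              intro j hj1 hj2
              rw [hmemdel']
              constructor
              · rintro (h | h | h)
                · exact h
                · omega
                · omega
              · exact Or.inl
            have c4 : kept cs del' i (i + 1) = [] := by
              rw [kept_one, if_pos ((hmemdel' i).mpr (Or.inr (Or.inr rfl)))]
            rw [c1, c2, c3, c4]
            simp
          rw [e1, e2]
          apply ih (i + 1) d0 del' hrest hlen'
          · have hd0pw : List.Pairwise (· < ·) d0 := (List.pairwise_append.mp hpair.1).1
            rw [List.pairwise_append]
            exact ⟨hd0pw, by simp, fun a ha b hb => by
              simp at hb; subst hb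
              have := hd0i a ha; omega⟩
          · intro j hj
            rw [hmemdel'] at hj
            rcases hj with h | h | h
            · exact Nat.lt_succ_of_lt (hdel j h)
            · omega
            · omega
          · intro q hq
            rw [hmemdel']
            rintro (h | h | h)
            · exact hdd q (by simp [hq]) h
            · have := hd0i q hq; omega
            · have := hd0i q hq; omega
          · intro q hq; exact hch q (by simp [hq])
      · -- ordinary character
        have hstep : bStep (front cs del 0 d, kept cs del (lastLo 0 d) i) c =
            (front cs del 0 d, kept cs del (lastLo 0 d) i ++ [c]) := by
          simp [bStep, h1, h2]
        have hastep : aStep cs (d, del) i = (d, del) := by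
          unfold aStep; rw [hc]; simp [h1, h2]
        have hL : lastLo 0 d ≤ i := lastLo_le d 0 i hdi (Nat.zero_le i)
        have e2 : kept cs del (lastLo 0 d) i ++ [c] = kept cs del (lastLo 0 d) (i + 1) := by
          rw [kept_succ cs del hL, if_neg hinot, hc]
        rw [hstep, hastep, e2]
        apply ih (i + 1) d del hrest hlen'
        · rw [List.pairwise_append]
          exact ⟨hpair.1, by simp, fun a ha b hb => by
            simp at hb; subst hb; exact Nat.lt_succ_of_lt (hdi a ha)⟩
        · exact fun j hj => Nat.lt_succ_of_lt (hdel j hj)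
        · exact hdd
        · exact hch

lemma del_quo_eq_alt (s : String) : del_quo (some s) = del_quo_alt (some s) := by
  simp only [del_quo, del_quo_alt]
  congr 1
  apply congrArg
  set cs := s.toList with hcs
  have hrange : List.range cs.length = List.range' 0 cs.length := List.range_eq_range'
  rw [hrange]
  have hA := loop2_eq cs ((List.range' 0 cs.length).foldl (aStep cs) ([], [])).2 cs.length 0 []
  rw [hA]
  have hB := main_inv cs cs 0 [] [] (by simp) (by simp) (by simp) (by simp) (by simp) (by simp)
  simp only [front, lastLo, kept_self] at hB
  rw [hB]
  simp

-- ===== VERDICT (by name: the statement is the Claim_ definition above) =====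
theorem del_quo_spec : Claim_equal_del_quo := by
  intro a_string _
  unfold Spec_del_quo
  match a_string with
  | none => rfl
  | some s => exact del_quo_eq_alt s
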